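-- pv_equiv track=rewrite | github.com/nathan-shivers/Bio-539-Final-Exam | Final_Exam.py | possible_substrings
-- ===== SOURCE A (Python) =====
-- def possible_substrings(sequence):
--     """
--     Returns the total possible number of k-mers for a given sequence.
--
--         Parameters
--             sequence (str): A single sequence as a string
--         Returns:
--             total (int): An integer of the count of all possible length k-mers for a sequence
--     """
--     if type(sequence) != str: ## Checks if sequence is a string and if not prints error message
--         return("Sequence needs to be a string")
--     else:
--         sub = []
--         for i in range(1, len(sequence) + 1): ## loops through all possible lenghts of k starting at 1
--             if 4**i <= len(sequence): ## If 4k is smaller than total length of sequence than 4k is used for total possible substrings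
--                 sub.append(4 ** i)
--             else: ## If 4k is larger than total length of sequence than n - k + 1 is used instead
--                 sub.append((len(sequence) - i) + 1)
--         total = sum(sub)
--         return(total) ## Returns the total sum of the list
-- ===== SOURCE B (Python) =====
-- def possible_substrings(sequence):
--     if type(sequence) != str:
--         return("Sequence needs to be a string")
--     n = len(sequence)
--     t = 0
--     while 4 ** (t + 1) <= n:
--         t += 1
--     return (4 ** (t + 1) - 4) // 3 + (n - t) * (n - t + 1) // 2
-- ===== Notes on version B (the rewrite author's own statement) =====
-- stated objective: faster
-- what changed: Replaces the length-n loop summing per-k terms with a closed form: find the threshold t with 4^(t+1) > n in O(log n) steps, then add the geometric sum (4^(t+1)-4)/3 and the triangular remainder (n-t)(n-t+1)/2.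
import Mathlib
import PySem

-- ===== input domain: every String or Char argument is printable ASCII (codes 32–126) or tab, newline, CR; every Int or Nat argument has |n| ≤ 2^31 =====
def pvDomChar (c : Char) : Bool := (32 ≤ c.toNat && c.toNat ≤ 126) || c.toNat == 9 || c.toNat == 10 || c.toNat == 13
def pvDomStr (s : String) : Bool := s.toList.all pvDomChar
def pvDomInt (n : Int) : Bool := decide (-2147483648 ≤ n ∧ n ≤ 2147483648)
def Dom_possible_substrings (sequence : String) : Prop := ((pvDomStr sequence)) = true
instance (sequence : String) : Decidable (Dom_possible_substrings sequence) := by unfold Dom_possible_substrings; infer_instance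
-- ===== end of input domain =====

-- B replaces A's length-n summing loop by an O(log n) closed form (threshold + geometric sum + triangular remainder).

-- ===== PORT A =====
-- Python's 4**i for i from range(1, n+1): i ≥ 1, so (4:Int)^i.toNat is exact.
def possible_substrings (sequence : String) : Int :=
  let n : Int := PySem.Str.len sequence
  let sub : List Int :=
    (PySem.List.pyRange 1 (n + 1) 1).foldl
      (fun acc i =>
        if (4:Int) ^ i.toNat ≤ n then acc ++ [(4:Int) ^ i.toNat]
        else acc ++ [(n - i) + 1]) []
  sub.sum

-- ===== PORT B =====
-- termination helper for the while loop: t + 2 ≤ 4^(t+1)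
theorem pv_two_add_le_four_pow (t : Nat) : (t : Int) + 2 ≤ (4:Int) ^ (t + 1) := by
  induction t with
  | zero => norm_num
  | succ k ih =>
    have h4 : (4:Int) ^ (k + 1 + 1) = 4 * (4:Int) ^ (k + 1) := by ring
    push_cast
    push_cast at ih
    nlinarith [ih]

-- the while loop: smallest t' ≥ t with 4^(t'+1) > n
def pvAltT (n : Int) (t : Nat) : Nat :=
  if h : (4:Int) ^ (t + 1) ≤ n then pvAltT n (t + 1) else t
termination_by n.toNat - t
decreasing_by
  have h2 := pv_two_add_le_four_pow t
  have ht : (t : Int) + 2 ≤ n := le_trans h2 h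
  omega

def possible_substrings_alt (sequence : String) : Int :=
  let n : Int := PySem.Str.len sequence
  let t : Nat := pvAltT n 0
  PySem.Int.floordiv ((4:Int) ^ (t + 1) - 4) 3 +
    PySem.Int.floordiv ((n - t) * (n - t + 1)) 2

-- ===== PRECONDITION & SPEC =====
def Spec_possible_substrings (sequence : String) (out : Int) : Prop := out = possible_substrings_alt sequence
instance (sequence : String) (out : Int) : Decidable (Spec_possible_substrings sequence out) := by unfold Spec_possible_substrings; infer_instance

-- ===== CLAIM (what is proved, stated in full; the proofs are below) =====
def Claim_equal_possible_substrings : Prop := ∀ (sequence : String), Dom_possible_substrings sequence → Spec_possible_substrings sequence (possible_substrings sequence)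

-- ===== LEMMAS AND PROOFS =====

theorem pvAltT_spec (n : Int) (t : Nat)
    (h : ∀ i : Nat, 1 ≤ i → i ≤ t → (4:Int) ^ i ≤ n) :
    (∀ i : Nat, 1 ≤ i → i ≤ pvAltT n t → (4:Int) ^ i ≤ n) ∧
      ¬ (4:Int) ^ (pvAltT n t + 1) ≤ n := by
  fun_induction pvAltT n t with
  | case1 t hc ih =>
    apply ih
    intro i h1 h2
    rcases Nat.lt_or_ge i (t + 1) with hlt | hge
    · exact h i h1 (by omega)
    · have : i = t + 1 := by omega
      subst this; exact hc
  | case2 t hc => exact ⟨h, hc⟩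

theorem pv_geom (r : Nat) :
    3 * ∑ k ∈ Finset.range r, (4:Int) ^ (k + 1) = (4:Int) ^ (r + 1) - 4 := by
  induction r with
  | zero => norm_num
  | succ k ih =>
    rw [Finset.sum_range_succ]
    have : (4:Int) ^ (k + 1 + 1) = 4 * (4:Int) ^ (k + 1) := by ring
    nlinarith [ih]

theorem pv_tri (m r : Nat) (h : r ≤ m) :
    2 * ∑ k ∈ Finset.Ico r m, ((m : Int) - k) =
      ((m : Int) - r) * ((m : Int) - r + 1) := by
  induction m with
  | zero =>
    have : r = 0 := by omega
    subst this; norm_num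
  | succ m ih =>
    rcases Nat.lt_or_ge m r with hlt | hge
    · have : r = m + 1 := by omega
      subst this; simp
    · rw [Finset.sum_Ico_succ_top (by omega)]
      have hsplit : ∑ k ∈ Finset.Ico r m, ((m : Int) + 1 - k) =
          (∑ k ∈ Finset.Ico r m, ((m : Int) - k)) + ((m : Int) - r) := by
        have he : ∀ k ∈ Finset.Ico r m, ((m : Int) + 1 - k) = ((m : Int) - k) + 1 :=
          fun k _ => by ring
        rw [Finset.sum_congr rfl he, Finset.sum_add_distrib, Finset.sum_const,
          Nat.card_Ico, nsmul_eq_mul, mul_one, Nat.cast_sub hge]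
      have hrec := ih hge
      push_cast
      push_cast at hsplit hrec
      rw [hsplit]
      nlinarith [hrec]

theorem pv_main (m : Nat) :
    (let n : Int := (m : Int);
      ((PySem.List.pyRange 1 (n + 1) 1).foldl
        (fun acc i =>
          if (4:Int) ^ i.toNat ≤ n then acc ++ [(4:Int) ^ i.toNat]
          else acc ++ [(n - i) + 1]) []).sum) =
    (let n : Int := (m : Int);
      let t : Nat := pvAltT n 0;
      PySem.Int.floordiv ((4:Int) ^ (t + 1) - 4) 3 +
        PySem.Int.floordiv ((n - t) * (n - t + 1)) 2) := by
  simp only []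
  set n : Int := (m : Int) with hn
  set r : Nat := pvAltT n 0 with hr
  obtain ⟨hA, hB⟩ := pvAltT_spec n 0 (by omega)
  rw [← hr] at hA hB
  -- r ≤ m
  have hrm : r ≤ m := by
    by_contra hc
    have hr1 : 1 ≤ r := by omega
    have h4r : (4:Int) ^ r ≤ n := hA r hr1 le_rfl
    have := pv_two_add_le_four_pow (r - 1)
    have hre : r - 1 + 1 = r := by omega
    rw [hre] at this
    omega
  -- the loop is a map-sum
  have hite : (fun (acc : List Int) (i : Int) =>
      if (4:Int) ^ i.toNat ≤ n then acc ++ [(4:Int) ^ i.toNat]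
      else acc ++ [(n - i) + 1]) =
      (fun acc i => acc ++ [if (4:Int) ^ i.toNat ≤ n then (4:Int) ^ i.toNat
        else (n - i) + 1]) := by
    funext acc i; split <;> rfl
  rw [hite, PySem.List.foldl_append_singleton_eq_map, List.nil_append,
    PySem.List.pyRange_one, List.map_map]
  have hm1 : ((n + 1) - 1).toNat = m := by omega
  rw [hm1]
  have hsum : ((List.range m).map
      ((fun i => if (4:Int) ^ i.toNat ≤ n then (4:Int) ^ i.toNat else (n - i) + 1) ∘
        (fun k : Nat => (1:Int) + k))).sum =
      ∑ k ∈ Finset.range m,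
        (if (4:Int) ^ (k + 1) ≤ n then (4:Int) ^ (k + 1) else n - ((k:Int) + 1) + 1) := by
    rw [show ((List.range m).map
        ((fun i => if (4:Int) ^ i.toNat ≤ n then (4:Int) ^ i.toNat else (n - i) + 1) ∘
          (fun k : Nat => (1:Int) + k))).sum =
        ∑ k ∈ Finset.range m,
          ((fun i => if (4:Int) ^ i.toNat ≤ n then (4:Int) ^ i.toNat else (n - i) + 1) ∘
            (fun k : Nat => (1:Int) + k)) k from rfl]
    refine Finset.sum_congr rfl ?_
    intro k _
    have ht : ((1:Int) + (k:Int)).toNat = k + 1 := by omega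
    simp only [Function.comp, ht]
    split <;> [rfl; ring_nf]
  rw [hsum]
  -- split the sum at r
  rw [Finset.range_eq_Ico, ← Finset.sum_Ico_consecutive _ (Nat.zero_le r) hrm]
  have hleft : ∑ k ∈ Finset.Ico 0 r,
      (if (4:Int) ^ (k + 1) ≤ n then (4:Int) ^ (k + 1) else n - ((k:Int) + 1) + 1) =
      ∑ k ∈ Finset.range r, (4:Int) ^ (k + 1) := by
    rw [← Finset.range_eq_Ico]
    refine Finset.sum_congr rfl ?_
    intro k hk
    have hkr : k < r := Finset.mem_range.mp hk
    rw [if_pos (hA (k + 1) (by omega) (by omega))]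
  have hright : ∑ k ∈ Finset.Ico r m,
      (if (4:Int) ^ (k + 1) ≤ n then (4:Int) ^ (k + 1) else n - ((k:Int) + 1) + 1) =
      ∑ k ∈ Finset.Ico r m, ((m : Int) - k) := by
    refine Finset.sum_congr rfl ?_
    intro k hk
    have hrk : r ≤ k := (Finset.mem_Ico.mp hk).1
    have hpow : (4:Int) ^ (r + 1) ≤ (4:Int) ^ (k + 1) :=
      pow_le_pow_right₀ (by norm_num) (by omega)
    rw [if_neg (by intro hc; exact hB (le_trans hpow hc))]
    rw [hn]; ring
  rw [hleft, hright]
  -- evaluate B's closed form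
  have h3 : PySem.Int.floordiv ((4:Int) ^ (r + 1) - 4) 3 =
      ∑ k ∈ Finset.range r, (4:Int) ^ (k + 1) := by
    rw [PySem.Int.floordiv_eq_ediv_of_pos (by norm_num), ← pv_geom r,
      Int.mul_ediv_cancel_left _ (by norm_num)]
  have h2 : PySem.Int.floordiv ((n - r) * (n - r + 1)) 2 =
      ∑ k ∈ Finset.Ico r m, ((m : Int) - k) := by
    have := pv_tri m r hrm
    rw [PySem.Int.floordiv_eq_ediv_of_pos (by norm_num), hn,
      show ((m:Int) - r) * ((m:Int) - r + 1) = 2 * ∑ k ∈ Finset.Ico r m, ((m : Int) - k) from this.symm,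
      Int.mul_ediv_cancel_left _ (by norm_num)]
  rw [h3, h2]

-- ===== VERDICT (by name: the statement is the Claim_ definition above) =====
theorem possible_substrings_spec : Claim_equal_possible_substrings := by
  intro s _
  unfold Spec_possible_substrings possible_substrings possible_substrings_alt
  simp only [PySem.Str.len_eq]
  exact pv_main s.toList.length
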